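-- pv_equiv track=rewrite | github.com/rumanappi125/rumana-portfolio | generate_word_resume.py | bold_phrases
-- ===== SOURCE A (Python) =====
-- def bold_phrases(text, phrases):
--     """Split text into (segment, bold) parts for bold phrase highlighting."""
--     parts = []
--     remaining = text
--     while remaining:
--         earliest = None
--         match_phrase = None
--         for phrase in phrases:
--             idx = remaining.find(phrase)
--             if idx != -1 and (earliest is None or idx < earliest):
--                 earliest = idx
--                 match_phrase = phrase
--         if earliest is None:
--             parts.append((remaining, False))
--             break
--         if earliest > 0:
--             parts.append((remaining[:earliest], False))
--         parts.append((match_phrase, True))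
--         remaining = remaining[earliest + len(match_phrase):]
--     return parts
-- ===== SOURCE B (Python) =====
-- def bold_phrases(text, phrases):
--     """Split text into (segment, bold) parts for bold phrase highlighting.
--
--     One left-to-right scan collects every phrase occurrence (position-major,
--     phrase-list-order within a position), then a single greedy pass over that
--     already-ordered match list builds the segments; no repeated .find() over
--     ever-shorter suffixes."""
--     n = len(text)
--     matches = []
--     for i in range(n):
--         for p in phrases:
--             if text[i:i + len(p)] == p:
--                 matches.append((i, p))
--     parts = []
--     cursor = 0
--     for i, p in matches:
--         if i >= cursor:
--             if i > cursor:
--                 parts.append((text[cursor:i], False))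
--             parts.append((p, True))
--             cursor = i + len(p)
--     if cursor < n:
--         parts.append((text[cursor:], False))
--     return parts
-- ===== Notes on version B (the rewrite author's own statement) =====
-- stated objective: faster
-- what changed: Instead of A's while-loop that rescans the ever-shorter remaining suffix with one find() per phrase per emitted segment (quadratic in the number of segments), B collects all phrase occurrences in one position-major scan and then builds the segments in a single greedy pass over that pre-ordered match list; …
-- outside the precondition, e.g. on bold_phrases('aa', ['a', '']): A returns [('a', True), ('a', True)], B returns [('a', True), ('a', True)]
import Mathlib
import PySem

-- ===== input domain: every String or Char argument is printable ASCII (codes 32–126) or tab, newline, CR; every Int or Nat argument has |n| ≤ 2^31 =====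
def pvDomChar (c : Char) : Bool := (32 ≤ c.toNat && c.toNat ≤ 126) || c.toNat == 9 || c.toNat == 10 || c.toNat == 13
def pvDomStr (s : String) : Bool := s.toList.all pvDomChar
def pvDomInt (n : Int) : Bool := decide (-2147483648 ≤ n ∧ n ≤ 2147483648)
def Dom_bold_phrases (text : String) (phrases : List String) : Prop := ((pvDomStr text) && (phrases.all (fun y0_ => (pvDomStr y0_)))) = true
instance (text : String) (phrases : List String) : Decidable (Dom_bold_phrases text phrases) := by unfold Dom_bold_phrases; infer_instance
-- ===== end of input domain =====

-- B replaces A's while-loop of repeated suffix .find() calls (one find per phrase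
-- per emitted segment) by one position-major scan that collects every phrase
-- occurrence, followed by a single greedy pass (objective: faster).

-- ===== PORT A =====
-- the inner `for phrase in phrases` loop of A: running (earliest, match_phrase)
def pvSelStep (rem : List Char) (acc : Option (Int × String)) (phrase : String) : Option (Int × String) :=
  let idx := PySem.Chars.find rem phrase.toList
  if idx != -1 && (match acc with | none => true | some (e, _) => decide (idx < e)) then
    some (idx, phrase)
  else acc

def pvSelect (rem : List Char) (phrases : List String) : Option (Int × String) :=
  phrases.foldl (pvSelStep rem) none

-- A's `while remaining:` loop; fuel = |text| + 1 suffices because under Pre_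
-- every iteration removes at least one character from `remaining`.
def pvAloop (phrases : List String) : Nat → List Char → List (String × Bool)
  | _, [] => []
  | 0, _ :: _ => []
  | fuel + 1, c :: cs =>
    match pvSelect (c :: cs) phrases with
    | none => [(String.ofList (c :: cs), false)]
    | some (e, p) =>
        (if 0 < e then [(String.ofList (PySem.List.slice (c :: cs) none (some e)), false)] else [])
          ++ (p, true)
          :: pvAloop phrases fuel (PySem.List.slice (c :: cs) (some (e + PySem.Str.len p)) none)

def bold_phrases (text : String) (phrases : List String) : List (String × Bool) :=
  pvAloop phrases (text.toList.length + 1) text.toList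

-- ===== PORT B =====
-- pass 1 of B: all phrase occurrences, position-major, phrase order within a position
def pvMatches (t : List Char) (phrases : List String) : List (Int × String) :=
  (PySem.List.pyRange 0 (t.length : Int) 1).foldl (fun acc i =>
    phrases.foldl (fun acc2 p =>
      if PySem.List.slice t (some i) (some (i + PySem.Str.len p)) = p.toList then
        acc2 ++ [(i, p)]
      else acc2) acc) []

-- pass 2 of B: one greedy sweep over the pre-ordered match list; state (cursor, parts)
def pvGreedy (t : List Char) (ms : List (Int × String)) : Int × List (String × Bool) :=
  ms.foldl (fun st m =>
    if st.1 ≤ m.1 then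
      (m.1 + PySem.Str.len m.2,
        st.2 ++ (if st.1 < m.1 then [(String.ofList (PySem.List.slice t (some st.1) (some m.1)), false)] else [])
            ++ [(m.2, true)])
    else st) (0, [])

-- the trailing `if cursor < n: parts.append((text[cursor:], False))` of Source B
def pvFinish (t : List Char) (st : Int × List (String × Bool)) : List (String × Bool) :=
  if st.1 < (t.length : Int) then st.2 ++ [(String.ofList (PySem.List.slice t (some st.1) none), false)]
  else st.2

def bold_phrases_alt (text : String) (phrases : List String) : List (String × Bool) :=
  pvFinish text.toList (pvGreedy text.toList (pvMatches text.toList phrases))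

-- ===== PRECONDITION & SPEC =====
-- Pre_ excludes the combination empty phrase + nonempty text: there A's while loop
-- in general makes no progress and hangs; in the sub-case where an earlier-listed
-- phrase matches at index 0 at every step A happens to return (and B agrees there),
-- but that termination is accidental.
def Pre_bold_phrases (text : String) (phrases : List String) : Prop :=
  text = "" ∨ "" ∉ phrases
instance (text : String) (phrases : List String) : Decidable (Pre_bold_phrases text phrases) := by
  unfold Pre_bold_phrases; infer_instance

def pvWitness_bold_phrases : String × List String := ("we build web apps", ["web", "apps"])

def Spec_bold_phrases (text : String) (phrases : List String) (out : List (String × Bool)) : Prop := out = bold_phrases_alt text phrases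
instance (text : String) (phrases : List String) (out : List (String × Bool)) : Decidable (Spec_bold_phrases text phrases out) := by unfold Spec_bold_phrases; infer_instance

-- ===== CLAIM (what is proved, stated in full; the proofs are below) =====
def Claim_equal_bold_phrases : Prop := ∀ (text : String) (phrases : List String), Dom_bold_phrases text phrases → Pre_bold_phrases text phrases → Spec_bold_phrases text phrases (bold_phrases text phrases)

-- ===== LEMMAS AND PROOFS =====

-- proof-side view of B's match list, over Nat positions
def pvHits (t : List Char) (ps : List String) (i : Nat) : List (Nat × String) :=
  (ps.filter (fun p => decide (p.toList <+: t.drop i))).map (fun p => (i, p))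

def pvNM (t : List Char) (ps : List String) : List (Nat × String) :=
  (List.range t.length).flatMap (pvHits t ps)

def pvF (t : List Char) (ps : List String) (c : Nat) : List (Nat × String) :=
  (pvNM t ps).filter (fun m => decide (c ≤ m.1))

-- proof-side recursive form of B's greedy fold
def pvGN (t : List Char) : Nat → List (Nat × String) → Nat × List (String × Bool)
  | c, [] => (c, [])
  | c, (i, p) :: ms =>
    if c ≤ i then
      ((pvGN t (i + p.toList.length) ms).1,
        (if c < i then [(String.ofList ((t.drop c).take (i - c)), false)] else [])
          ++ (p, true) :: (pvGN t (i + p.toList.length) ms).2)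
    else pvGN t c ms

def pvTail (t : List Char) (c : Nat) : List (String × Bool) :=
  if c < t.length then [(String.ofList (t.drop c), false)] else []

lemma pv_matches_eq (t : List Char) (ps : List String) :
    pvMatches t ps = (pvNM t ps).map (fun m => ((m.1 : Int), m.2)) := by
  have hiff : ∀ (p l : List Char), (List.take p.length l = p) ↔ (p <+: l) := by
    intro p l; rw [List.prefix_iff_eq_take]; exact eq_comm
  have hinner : ∀ (k : Nat) (acc : List (Int × String)),
      ps.foldl (fun acc2 p =>
        if PySem.List.slice t (some (k : Int)) (some ((k : Int) + PySem.Str.len p)) = p.toList then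
          acc2 ++ [((k : Int), p)] else acc2) acc
        = acc ++ ((ps.filter (fun p => decide (p.toList <+: t.drop k))).map
            (fun p => ((k : Int), p))) := by
    intro k acc
    have h := PySem.List.foldl_append_if (fun p : String => decide (p.toList <+: t.drop k))
      (fun p : String => ((k : Int), p)) ps acc
    simp only [decide_eq_true_eq] at h
    rw [← h]
    congr 1
    funext acc2 p
    simp only [PySem.Str.len_eq, PySem.List.slice_natCast_add, hiff]
  unfold pvMatches pvNM pvHits
  rw [PySem.List.pyRange_zero_natCast, List.foldl_map]
  simp only [hinner]
  rw [PySem.List.foldl_append_eq_flatMap]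
  simp [List.map_flatMap, List.map_map, Function.comp_def]

lemma pv_greedy_cast (t : List Char) :
    ∀ (ms : List (Nat × String)) (c : Nat) (parts : List (String × Bool)),
      (ms.map (fun m => ((m.1 : Int), m.2))).foldl (fun st m =>
        if st.1 ≤ m.1 then
          (m.1 + PySem.Str.len m.2,
            st.2 ++ (if st.1 < m.1 then [(String.ofList (PySem.List.slice t (some st.1) (some m.1)), false)] else [])
                ++ [(m.2, true)])
        else st) ((c : Int), parts)
      = (((pvGN t c ms).1 : Int), parts ++ (pvGN t c ms).2) := by
  intro ms
  induction ms with
  | nil => intro c parts; simp [pvGN]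
  | cons m ms ih =>
    intro c parts
    obtain ⟨i, p⟩ := m
    simp only [List.map_cons, List.foldl_cons]
    by_cases hci : c ≤ i
    · have hle : ((c : Int)) ≤ (i : Int) := by exact_mod_cast hci
      rw [if_pos hle, PySem.Str.len_eq p]
      have hcast : ((i : Int)) + ((p.toList.length : Nat) : Int) = (((i + p.toList.length : Nat)) : Int) := by
        push_cast; ring
      rw [hcast, ih]
      simp only [pvGN, if_pos hci]
      by_cases hlt : c < i
      · have hlt' : ((c : Int)) < (i : Int) := by exact_mod_cast hlt
        rw [if_pos hlt', if_pos hlt]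
        rw [PySem.List.slice_natCast]
        simp
      · have hlt' : ¬ ((c : Int)) < (i : Int) := by exact_mod_cast hlt
        rw [if_neg hlt', if_neg hlt]
        simp
    · have hle : ¬ ((c : Int)) ≤ (i : Int) := by exact_mod_cast hci
      rw [if_neg hle, ih]
      simp only [pvGN, if_neg hci]

lemma pv_GN_filter (t : List Char) :
    ∀ (ms : List (Nat × String)) (c c' : Nat), c ≤ c' →
      pvGN t c' (ms.filter (fun m => decide (c ≤ m.1))) = pvGN t c' ms := by
  intro ms
  induction ms with
  | nil => intro c c' _; simp
  | cons m ms ih =>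
    intro c c' hcc
    obtain ⟨i, p⟩ := m
    by_cases hci : c ≤ i
    · simp only [List.filter_cons, decide_eq_true_eq, if_pos hci]
      by_cases hc'i : c' ≤ i
      · simp only [pvGN, if_pos hc'i]
        rw [ih c (i + p.toList.length) (le_trans hci (Nat.le_add_right _ _))]
      · simp only [pvGN, if_neg hc'i]
        exact ih c c' hcc
    · simp only [List.filter_cons, decide_eq_true_eq, if_neg hci]
      have : ¬ c' ≤ i := fun h => hci (le_trans hcc h)
      rw [ih c c' hcc]
      simp only [pvGN, if_neg this]

-- characterization of A's inner selection fold
def pvSelOk (rem : List Char) (l : List String) : Option (Int × String) → Prop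
  | none => ∀ q ∈ l, PySem.Chars.find rem q.toList = -1
  | some (e, p) => 0 ≤ e ∧ ∃ l₁ l₂, l = l₁ ++ p :: l₂ ∧ PySem.Chars.find rem p.toList = e ∧
      (∀ q ∈ l₁, PySem.Chars.find rem q.toList = -1 ∨ e < PySem.Chars.find rem q.toList) ∧
      (∀ q ∈ l₂, PySem.Chars.find rem q.toList = -1 ∨ e ≤ PySem.Chars.find rem q.toList)

lemma pv_select_ok (rem : List Char) (l : List String) : pvSelOk rem l (pvSelect rem l) := by
  induction l using List.reverseRecOn with
  | nil => intro q hq; simp at hq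
  | append_singleton l q ih =>
    have hfold : pvSelect rem (l ++ [q]) = pvSelStep rem (pvSelect rem l) q := by
      simp [pvSelect, List.foldl_append]
    rw [hfold]
    rcases hsel : pvSelect rem l with _ | ⟨e, p⟩ <;> rw [hsel] at ih
    · by_cases hq : PySem.Chars.find rem q.toList = -1
      · have hstep : pvSelStep rem none q = none := by
          simp [pvSelStep, hq]
        rw [hstep]
        intro q' hq'
        rcases List.mem_append.1 hq' with h | h
        · exact ih q' h
        · simp only [List.mem_singleton] at h; subst h; exact hq
      · have hstep : pvSelStep rem none q = some (PySem.Chars.find rem q.toList, q) := by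
          simp [pvSelStep, hq]
        rw [hstep]
        refine ⟨?_, l, [], rfl, rfl, ?_, by simp⟩
        · have := PySem.Chars.neg_one_le_find rem q.toList
          omega
        · intro q' hq'; exact Or.inl (ih q' hq')
    · obtain ⟨he0, l₁, l₂, hdecomp, hfind, hl₁, hl₂⟩ := ih
      by_cases hcond : PySem.Chars.find rem q.toList ≠ -1 ∧ PySem.Chars.find rem q.toList < e
      · have hstep : pvSelStep rem (some (e, p)) q = some (PySem.Chars.find rem q.toList, q) := by
          simp [pvSelStep, hcond.1, hcond.2]
        rw [hstep]
        refine ⟨?_, l, [], rfl, rfl, ?_, by simp⟩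
        · have := PySem.Chars.neg_one_le_find rem q.toList
          have := hcond.1; omega
        · intro q' hq'
          subst hdecomp
          rcases List.mem_append.1 hq' with h | h
          · rcases hl₁ q' h with h' | h'
            · exact Or.inl h'
            · exact Or.inr (lt_trans hcond.2 h')
          · rcases List.mem_cons.1 h with h' | h'
            · subst h'; exact Or.inr (hfind ▸ hcond.2)
            · rcases hl₂ q' h' with h'' | h''
              · exact Or.inl h''
              · exact Or.inr (lt_of_lt_of_le hcond.2 h'')
      · have hstep : pvSelStep rem (some (e, p)) q = some (e, p) := by
          simp only [pvSelStep]
          by_cases h1 : PySem.Chars.find rem q.toList = -1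
          · simp [h1]
          · have h2 : ¬ PySem.Chars.find rem q.toList < e := fun hlt => hcond ⟨h1, hlt⟩
            simp [h2]
        rw [hstep]
        refine ⟨he0, l₁, l₂ ++ [q], by rw [hdecomp]; simp, hfind, hl₁, ?_⟩
        intro q' hq'
        rcases List.mem_append.1 hq' with h | h
        · exact hl₂ q' h
        · simp only [List.mem_singleton] at h; subst h
          by_cases h1 : PySem.Chars.find rem q'.toList = -1
          · exact Or.inl h1
          · have h2 : ¬ PySem.Chars.find rem q'.toList < e := fun hlt => hcond ⟨h1, hlt⟩
            exact Or.inr (not_lt.1 h2)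

lemma pv_mem_NM (t : List Char) (ps : List String) (m : Nat × String) :
    m ∈ pvNM t ps ↔ m.1 < t.length ∧ m.2 ∈ ps ∧ m.2.toList <+: t.drop m.1 := by
  obtain ⟨i, p⟩ := m
  simp only [pvNM, pvHits, List.mem_flatMap, List.mem_map, List.mem_filter, List.mem_range,
    decide_eq_true_eq]
  constructor
  · rintro ⟨j, hj, q, ⟨hq, hpre⟩, h⟩
    obtain ⟨h1, h2⟩ := Prod.mk.injEq .. ▸ h
    cases h; exact ⟨hj, hq, hpre⟩
  · rintro ⟨hi, hp, hpre⟩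
    exact ⟨i, hi, p, ⟨hp, hpre⟩, rfl⟩

lemma pv_mem_hits (t : List Char) (ps : List String) (i : Nat) (m : Nat × String) :
    m ∈ pvHits t ps i → m.1 = i := by
  intro hm
  simp only [pvHits, List.mem_map, List.mem_filter] at hm
  obtain ⟨q, _, hq⟩ := hm
  rw [← hq]

lemma pv_F_ranges (t : List Char) (ps : List String) (c : Nat) (hc : c ≤ t.length) :
    pvF t ps c = (List.range' c (t.length - c)).flatMap (pvHits t ps) := by
  unfold pvF pvNM
  rw [List.filter_flatMap]
  have hpt : ∀ i : Nat, (pvHits t ps i).filter (fun m => decide (c ≤ m.1))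
      = if c ≤ i then pvHits t ps i else [] := by
    intro i
    by_cases h : c ≤ i
    · rw [if_pos h]
      apply List.filter_eq_self.2
      intro m hm
      have := pv_mem_hits t ps i m hm
      simp [this, h]
    · rw [if_neg h]
      apply List.filter_eq_nil_iff.2
      intro m hm
      have := pv_mem_hits t ps i m hm
      simp [this, h]
  simp only [hpt]
  rw [List.range_eq_range', show t.length = c + (t.length - c) by omega,
    ← List.range'_append_1, List.flatMap_append]
  have h1 : (List.range' 0 c).flatMap (fun i => if c ≤ i then pvHits t ps i else []) = [] := by
    apply List.flatMap_eq_nil_iff.2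
    intro i hi
    have := List.mem_range'_1.1 hi
    rw [if_neg (by omega)]
  have h2 : (List.range' (0 + c) (t.length - c)).flatMap (fun i => if c ≤ i then pvHits t ps i else [])
      = (List.range' c (t.length - c)).flatMap (pvHits t ps) := by
    rw [Nat.zero_add]
    apply List.flatMap_congr
    intro i hi
    have := List.mem_range'_1.1 hi
    rw [if_pos (by omega)]
  rw [h1, h2, List.nil_append, show c + (t.length - c) - c = t.length - c from by omega]

lemma pv_main (t : List Char) (ps : List String) (hne : ∀ q ∈ ps, q.toList ≠ []) :
    ∀ (fuel c : Nat), c ≤ t.length → t.length - c < fuel →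
      pvAloop ps fuel (t.drop c)
        = (pvGN t c (pvF t ps c)).2 ++ pvTail t (pvGN t c (pvF t ps c)).1 := by
  intro fuel
  induction fuel with
  | zero => intro c hc hf; omega
  | succ fuel ih =>
    intro c hc hf
    -- a phrase prefix at an admissible position yields facts about A's find
    have hinfix : ∀ (q : String) (i : Nat), c ≤ i → q.toList <+: t.drop i →
        0 ≤ PySem.Chars.find (t.drop c) q.toList ∧
        (PySem.Chars.find (t.drop c) q.toList).toNat ≤ i - c := by
      intro q i hci hpre
      have hd : t.drop i = (t.drop c).drop (i - c) := by
        rw [List.drop_drop, Nat.add_sub_cancel' hci]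
      rw [hd] at hpre
      have hinf : q.toList <:+: t.drop c :=
        hpre.isInfix.trans (List.drop_suffix (i - c) (t.drop c)).isInfix
      have hnn : 0 ≤ PySem.Chars.find (t.drop c) q.toList :=
        (PySem.Chars.find_nonneg_iff _ _).2 hinf
      refine ⟨hnn, ?_⟩
      have hspec := PySem.Chars.find_spec hnn
      by_contra hgt
      exact hspec.2 (i - c) (by omega) hpre
    by_cases hcn : c = t.length
    · have hrem : t.drop c = [] := by
        apply List.drop_eq_nil_of_le; omega
      have hF : pvF t ps c = [] := by
        apply List.filter_eq_nil_iff.2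
        intro m hm
        have := (pv_mem_NM t ps m).1 hm
        simp only [decide_eq_true_eq]
        omega
      rw [hrem, hF]
      have : ¬ c < t.length := by omega
      simp [pvAloop, pvGN, pvTail, this]
    · have hclt : c < t.length := lt_of_le_of_ne hc hcn
      obtain ⟨x, xs, hrem⟩ : ∃ x xs, t.drop c = x :: xs := by
        cases hd : t.drop c with
        | nil =>
          exfalso
          have := List.length_drop (i := c) (l := t)
          rw [hd] at this
          simp at this
          omega
        | cons x xs => exact ⟨x, xs, rfl⟩
      have hok := pv_select_ok (t.drop c) ps
      rcases hsel : pvSelect (t.drop c) ps with _ | ⟨e, p⟩ <;> rw [hsel] at hok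
      · -- no phrase occurs anywhere in the suffix
        have hsel' : pvSelect (x :: xs) ps = none := by rw [← hrem]; exact hsel
        have hA : pvAloop ps (fuel + 1) (t.drop c) = [(String.ofList (t.drop c), false)] := by
          rw [hrem]
          simp only [pvAloop, hsel']
        rw [hA]
        have hF : pvF t ps c = [] := by
          apply List.filter_eq_nil_iff.2
          intro m hm
          obtain ⟨hlt, hmem, hpre⟩ := (pv_mem_NM t ps m).1 hm
          simp only [decide_eq_true_eq]
          intro hci
          have := (hinfix m.2 m.1 hci hpre).1
          have := hok m.2 hmem
          omega
        rw [hF]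
        simp [pvGN, pvTail, hclt]
      · have hsel' : pvSelect (x :: xs) ps = some (e, p) := by rw [← hrem]; exact hsel
        have hA : pvAloop ps (fuel + 1) (t.drop c)
            = (if 0 < e then [(String.ofList (PySem.List.slice (t.drop c) none (some e)), false)] else [])
                ++ (p, true)
                :: pvAloop ps fuel (PySem.List.slice (t.drop c) (some (e + PySem.Str.len p)) none) := by
          conv_lhs => rw [hrem]
          simp only [pvAloop, hsel']
          rw [← hrem]
        rw [hA]
        obtain ⟨he0, l₁, l₂, hdecomp, hfind, hl₁, hl₂⟩ := hok
        have hpmem : p ∈ ps := by rw [hdecomp]; simp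
        have hpne : p.toList ≠ [] := hne p hpmem
        have heN : ((e.toNat : Nat) : Int) = e := Int.toNat_of_nonneg he0
        have hspec := PySem.Chars.find_spec (s := t.drop c) (sub := p.toList) (by rw [hfind]; exact he0)
        rw [hfind] at hspec
        have hp_pre : p.toList <+: t.drop (c + e.toNat) := by
          rw [← List.drop_drop]
          exact hspec.1
        have hlp1 : 1 ≤ p.toList.length := List.length_pos_iff.2 hpne
        have hplen : c + e.toNat + p.toList.length ≤ t.length := by
          have h := hp_pre.length_le
          rw [List.length_drop] at h
          omega
        -- positions strictly before the selected one carry no match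
        have hnomatch : ∀ i : Nat, c ≤ i → i < c + e.toNat → pvHits t ps i = [] := by
          intro i h1 h2
          unfold pvHits
          rw [List.filter_eq_nil_iff.2, List.map_nil]
          intro q hq
          simp only [decide_eq_true_eq]
          intro hpre
          obtain ⟨hnn, hle⟩ := hinfix q i h1 hpre
          have hall : e ≤ PySem.Chars.find (t.drop c) q.toList := by
            have hqmem : q ∈ ps := hq
            rw [hdecomp] at hqmem
            rcases List.mem_append.1 hqmem with h | h
            · rcases hl₁ q h with h' | h' <;> omega
            · rcases List.mem_cons.1 h with h' | h'
              · subst h'; omega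
              · rcases hl₂ q h' with h'' | h'' <;> omega
          omega
        -- at the selected position, p is the first phrase that matches
        have hl₁no : ∀ q ∈ l₁, ¬ q.toList <+: t.drop (c + e.toNat) := by
          intro q hq hpre
          obtain ⟨hnn, hle⟩ := hinfix q (c + e.toNat) (by omega) hpre
          rcases hl₁ q hq with h' | h' <;> omega
        have hHitsHead : pvHits t ps (c + e.toNat)
            = (c + e.toNat, p) :: (l₂.filter (fun q => decide (q.toList <+: t.drop (c + e.toNat)))).map
                (fun q => (c + e.toNat, q)) := by
          unfold pvHits
          rw [hdecomp, List.filter_append, List.filter_cons,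
            List.filter_eq_nil_iff.2 (by intro q hq; simp only [decide_eq_true_eq]; exact hl₁no q hq)]
          simp [hp_pre]
        -- decompose B's filtered match list: dead prefix, the head, the rest
        have hFc : pvF t ps c
            = (c + e.toNat, p) :: ((l₂.filter (fun q => decide (q.toList <+: t.drop (c + e.toNat)))).map
                (fun q => (c + e.toNat, q))
              ++ (List.range' (c + e.toNat + 1) (t.length - (c + e.toNat + 1))).flatMap (pvHits t ps)) := by
          rw [pv_F_ranges t ps c hc,
            show t.length - c = e.toNat + (t.length - c - e.toNat) by omega,
            ← List.range'_append_1, List.flatMap_append,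
            List.flatMap_eq_nil_iff.2 (by
              intro i hi
              have := List.mem_range'_1.1 hi
              exact hnomatch i (by omega) (by omega)),
            List.nil_append,
            show t.length - c - e.toNat = (t.length - (c + e.toNat + 1)) + 1 by omega,
            List.range'_succ, List.flatMap_cons, hHitsHead]
          rfl
        set c' := c + e.toNat + p.toList.length with hc'
        set TL := (l₂.filter (fun q => decide (q.toList <+: t.drop (c + e.toNat)))).map
                (fun q => (c + e.toNat, q))
              ++ (List.range' (c + e.toNat + 1) (t.length - (c + e.toNat + 1))).flatMap (pvHits t ps)
          with hTL
        have hFF : (pvF t ps c).filter (fun m => decide (c' ≤ m.1)) = pvF t ps c' := by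
          unfold pvF
          rw [List.filter_filter]
          apply List.filter_congr
          intro m hm
          by_cases h : c' ≤ m.1
          · have h2 : c ≤ m.1 := by omega
            simp [h, h2]
          · simp [h]
        have hTF : TL.filter (fun m => decide (c' ≤ m.1)) = pvF t ps c' := by
          rw [← hFF, hFc, List.filter_cons,
            if_neg (by simp only [decide_eq_true_eq]; omega)]
        have hr : pvGN t c' TL = pvGN t c' (pvF t ps c') := by
          rw [← hTF]
          exact (pv_GN_filter t TL c' c' le_rfl).symm
        have hGN : pvGN t c (pvF t ps c)
            = ((pvGN t c' (pvF t ps c')).1,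
                (if c < c + e.toNat then [(String.ofList ((t.drop c).take (c + e.toNat - c)), false)] else [])
                  ++ (p, true) :: (pvGN t c' (pvF t ps c')).2) := by
          rw [hFc]
          simp only [pvGN]
          rw [if_pos (show c ≤ c + e.toNat by omega)]
          rw [show c + e.toNat + p.toList.length = c' from rfl, hr]
        have hsliceFrom : PySem.List.slice (t.drop c) (some (e + PySem.Str.len p)) none = t.drop c' := by
          rw [PySem.Str.len_eq,
            PySem.List.slice_from _ (by have h := he0; positivity)]
          have h1 : (e + (p.toList.length : Int)).toNat = e.toNat + p.toList.length := by omega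
          rw [h1, List.drop_drop, show c + (e.toNat + p.toList.length) = c' from by omega]
        have hsegA : (if 0 < e then [(String.ofList (PySem.List.slice (t.drop c) none (some e)), false)] else [])
            = (if c < c + e.toNat then [(String.ofList ((t.drop c).take (c + e.toNat - c)), false)] else []) := by
          by_cases h : 0 < e
          · rw [if_pos h, if_pos (by omega), PySem.List.slice_to _ he0,
              show c + e.toNat - c = e.toNat from by omega]
          · rw [if_neg h, if_neg (by omega)]
        rw [hsliceFrom, hsegA, hGN, ih c' (by omega) (by omega)]
        simp [List.append_assoc]

lemma pv_B_eq (text : String) (ps : List String) :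
    bold_phrases_alt text ps
      = (pvGN text.toList 0 (pvNM text.toList ps)).2
          ++ pvTail text.toList (pvGN text.toList 0 (pvNM text.toList ps)).1 := by
  unfold bold_phrases_alt pvGreedy pvFinish pvTail
  rw [pv_matches_eq]
  have h := pv_greedy_cast text.toList (pvNM text.toList ps) 0 []
  simp only [Nat.cast_zero] at h
  rw [h]
  simp only [List.nil_append]
  by_cases hc : (pvGN text.toList 0 (pvNM text.toList ps)).1 < text.toList.length
  · rw [if_pos (by exact_mod_cast hc), if_pos hc,
      PySem.List.slice_from _ (by positivity)]
    simp
  · rw [if_neg (by exact_mod_cast hc), if_neg hc]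
    simp

-- ===== VERDICT (by name: the statement is the Claim_ definition above) =====
theorem bold_phrases_spec : Claim_equal_bold_phrases := by
  intro text ps _ hpre
  unfold Spec_bold_phrases
  rcases hpre with h | h
  · subst h
    rfl
  · have hne : ∀ q ∈ ps, q.toList ≠ [] := by
      intro q hq hqe
      apply h
      have hq0 : q = "" := by
        rw [← @String.ofList_toList q, hqe]
      rw [← hq0]
      exact hq
    rw [pv_B_eq]
    have hmain := pv_main text.toList ps hne (text.toList.length + 1) 0 (Nat.zero_le _) (by omega)
    simp only [List.drop_zero] at hmain
    rw [show bold_phrases text ps = pvAloop ps (text.toList.length + 1) text.toList from rfl, hmain]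
    have hflt : pvGN text.toList 0 (pvF text.toList ps 0) = pvGN text.toList 0 (pvNM text.toList ps) :=
      pv_GN_filter text.toList (pvNM text.toList ps) 0 0 le_rfl
    rw [hflt]
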